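-- pv_equiv track=rewrite | github.com/riqie/Aprendendo | Linguagens de Programação/Python/1. Introdução a Programação/Exercícios da Lista/Lista 10/M10L - ex11.py | contar_pares
-- ===== SOURCE A (Python) =====
-- def contar_pares(lista):
--     if lista == []:  # Caso lista vazia
--         return 0
--     primeira = lista[0]  # Pega a primeira sublista
--     soma = 0
--     for i in primeira:
--         if i % 2 == 0:
--             soma += 1  # Conta os pares na sublista
--     return soma + contar_pares(lista[1:])
-- ===== SOURCE B (Python) =====
-- def contar_pares(lista):
--     contador = 0
--     for sublista in lista:
--         for elemento in sublista:
--             if elemento % 2 == 0: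
--                 contador += 1
--     return contador
-- ===== Notes on version B (the rewrite author's own statement) =====
-- stated objective: simpler
-- what changed: Replaces A's recursion over the tail with slicing by a single iterative nested-loop counter.
import Mathlib
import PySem

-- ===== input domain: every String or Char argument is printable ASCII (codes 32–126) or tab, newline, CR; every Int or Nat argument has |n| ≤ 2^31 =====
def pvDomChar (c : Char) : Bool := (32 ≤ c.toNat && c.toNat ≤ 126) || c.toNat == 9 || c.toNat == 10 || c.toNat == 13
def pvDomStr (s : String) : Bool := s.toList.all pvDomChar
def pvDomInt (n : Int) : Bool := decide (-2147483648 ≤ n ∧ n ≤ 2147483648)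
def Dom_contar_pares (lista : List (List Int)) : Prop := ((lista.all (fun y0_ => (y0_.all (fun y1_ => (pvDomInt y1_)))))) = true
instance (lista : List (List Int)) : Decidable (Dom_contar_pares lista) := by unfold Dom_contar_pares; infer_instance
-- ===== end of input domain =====

-- ===== PORT A =====
def contar_pares : List (List Int) → Int
  | [] => 0
  | primeira :: resto =>
      (primeira.foldl (fun soma i => if PySem.Int.mod i 2 = 0 then soma + 1 else soma) 0)
      + contar_pares resto

-- ===== PORT B =====
def contar_pares_alt (lista : List (List Int)) : Int :=
  lista.foldl (fun contador sublista =>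
    sublista.foldl (fun c elemento => if PySem.Int.mod elemento 2 = 0 then c + 1 else c) contador) 0

-- ===== PRECONDITION & SPEC =====
def Spec_contar_pares (lista : List (List Int)) (out : Int) : Prop := out = contar_pares_alt lista
instance (lista : List (List Int)) (out : Int) : Decidable (Spec_contar_pares lista out) := by unfold Spec_contar_pares; infer_instance

-- ===== CLAIM (what is proved, stated in full; the proofs are below) =====
def Claim_equal_contar_pares : Prop := ∀ (lista : List (List Int)), Dom_contar_pares lista → Spec_contar_pares lista (contar_pares lista)

-- ===== LEMMAS AND PROOFS =====

-- ===== VERDICT (by name: the statement is the Claim_ definition above) =====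
theorem alt_aux (l : List (List Int)) (c : Int) :
    l.foldl (fun contador sublista =>
      sublista.foldl (fun c elemento => if PySem.Int.mod elemento 2 = 0 then c + 1 else c) contador) c
    = c + contar_pares l := by
  induction l generalizing c with
  | nil => simp [contar_pares]
  | cons h t ih =>
      simp only [List.foldl, contar_pares, ih]
      have : ∀ (xs : List Int) (c : Int),
          xs.foldl (fun c e => if PySem.Int.mod e 2 = 0 then c + 1 else c) c
          = c + xs.foldl (fun s i => if PySem.Int.mod i 2 = 0 then s + 1 else s) 0 := by
        intro xs
        induction xs with
        | nil => simp
        | cons x xs ihx =>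
            intro c
            simp only [List.foldl]
            rw [ihx, ihx (if PySem.Int.mod x 2 = 0 then (0:Int) + 1 else 0)]
            split <;> ring
      rw [this]
      ring

theorem contar_pares_spec : Claim_equal_contar_pares := by
  intro lista _
  unfold Spec_contar_pares contar_pares_alt
  rw [alt_aux]
  ring
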